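-- pv_equiv track=rewrite | github.com/razzlestorm/code-challenges | requestMatching_Med/naive_solution.py | requestMatching
-- ===== SOURCE A (Python) =====
-- def requestMatching(pros, distances, travelPreferences):
--     matching = {}
--     non_matching = {}
--     # compare distances/travelPreferences and append to different dicts
--     for ii in range(len(pros)):
--         if distances[ii] <= travelPreferences[ii]:
--             matching[pros[ii]] = distances[ii]
--         elif distances[ii] > travelPreferences[ii]:
--             non_matching[pros[ii]] = distances[ii] - travelPreferences[ii]
--     pros = []
--
--     for k, v in sorted(matching.items(), key=lambda item: item[1]):
--         pros.append(k)
--     for k, v in sorted(non_matching.items(), key=lambda item: item[1]):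
--         pros.append(k)
--     # but wait, we need to make sure the names are in the right order:
--
--     checked_pros = []
--     matching.update(non_matching)
--     for ii in range(len(pros[:5])):
--         matches = []
--         matches.append(pros[ii])
--
--         for k, v in matching.items():
--             if v == matching[pros[ii]] and k != pros[ii]:
--                 matches.append(k)
--         for name in sorted(matches):
--             if name not in checked_pros:
--                 checked_pros.append(name)
--     return checked_pros
-- ===== SOURCE B (Python) =====
-- def requestMatching(pros, distances, travelPreferences):
--     matching = {}
--     non_matching = {}
--     for p, d, t in zip(pros, distances, travelPreferences):
--         if d <= t:
--             matching[p] = d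
--         else:
--             non_matching[p] = d - t
--
--     primary = [k for k, _ in sorted(matching.items(), key=lambda it: it[1])]
--     primary += [k for k, _ in sorted(non_matching.items(), key=lambda it: it[1])]
--
--     merged = dict(matching)
--     merged.update(non_matching)
--
--     # one pass over the merged dict grouping names by value
--     groups = {}
--     for k, v in merged.items():
--         groups[v] = groups.get(v, []) + [k]
--
--     result = []
--     for seed in primary[:5]:
--         for name in sorted(groups[merged[seed]]):
--             if name not in result:
--                 result.append(name)
--     return result
-- ===== Notes on version B (the rewrite author's own statement) =====
-- stated objective: alternative
-- what changed: B keeps the two-dict partition and value-sorts but replaces A's per-seed rescan of the merged dict (one full scan for each of the top-5 entries) by a single grouping pass building a value->names index that is looked up per seed; the partition loop iterates zip(pros, distances, travelPreferences) instead of indexing by range.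
import Mathlib
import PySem

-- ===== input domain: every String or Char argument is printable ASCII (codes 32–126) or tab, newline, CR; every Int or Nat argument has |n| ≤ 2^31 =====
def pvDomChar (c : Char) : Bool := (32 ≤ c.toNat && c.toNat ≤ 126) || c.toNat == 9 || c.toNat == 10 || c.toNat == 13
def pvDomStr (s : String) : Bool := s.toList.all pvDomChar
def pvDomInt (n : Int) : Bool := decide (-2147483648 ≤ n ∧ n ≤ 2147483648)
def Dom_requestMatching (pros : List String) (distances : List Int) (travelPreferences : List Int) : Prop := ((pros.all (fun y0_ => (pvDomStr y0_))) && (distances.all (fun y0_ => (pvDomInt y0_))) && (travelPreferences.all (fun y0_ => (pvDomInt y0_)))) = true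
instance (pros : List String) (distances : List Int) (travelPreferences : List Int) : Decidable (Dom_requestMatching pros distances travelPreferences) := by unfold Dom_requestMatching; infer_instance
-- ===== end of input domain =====

-- B replaces A's repeated O(n) rescans of the merged dict (one per top-5 seed) by a single
-- grouping pass building a value -> names index, then per-seed lookups; same return value.

-- ===== PORT A =====
def requestMatching (pros : List String) (distances : List Int) (travelPreferences : List Int) : List String :=
  let dicts : PySem.Dict String Int × PySem.Dict String Int :=
    (PySem.List.pyRange 0 pros.length 1).foldl
      (fun st ii =>
        let p := PySem.List.pyGetD pros ii ""
        let d := PySem.List.pyGetD distances ii 0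
        let t := PySem.List.pyGetD travelPreferences ii 0
        if d ≤ t then (st.1.insert p d, st.2) else (st.1, st.2.insert p (d - t)))
      (PySem.Dict.empty, PySem.Dict.empty)
  let matching := dicts.1
  let non_matching := dicts.2
  let pros1 := (PySem.List.sorted matching.items (fun it => it.2)).foldl
      (fun acc kv => acc ++ [kv.1]) []
  let pros2 := (PySem.List.sorted non_matching.items (fun it => it.2)).foldl
      (fun acc kv => acc ++ [kv.1]) pros1
  let merged := matching.update non_matching.items
  (PySem.List.pyRange 0 ((PySem.List.slice pros2 none (some 5)).length) 1).foldl
    (fun checked ii =>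
      let seed := PySem.List.pyGetD pros2 ii ""
      let mv := merged.getD seed 0
      let ms := merged.items.foldl
        (fun m kv => if kv.2 == mv && kv.1 != seed then m ++ [kv.1] else m) [seed]
      (PySem.List.sorted ms (fun x => x)).foldl
        (fun ch name => if name ∈ ch then ch else ch ++ [name]) checked)
    []

-- ===== PORT B =====
def requestMatching_alt (pros : List String) (distances : List Int) (travelPreferences : List Int) : List String :=
  let dicts : PySem.Dict String Int × PySem.Dict String Int :=
    (List.zip pros (List.zip distances travelPreferences)).foldl
      (fun st x =>
        if x.2.1 ≤ x.2.2 then (st.1.insert x.1 x.2.1, st.2)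
        else (st.1, st.2.insert x.1 (x.2.1 - x.2.2)))
      (PySem.Dict.empty, PySem.Dict.empty)
  let matching := dicts.1
  let non_matching := dicts.2
  let primary := (PySem.List.sorted matching.items (fun it => it.2)).map (fun kv => kv.1)
      ++ (PySem.List.sorted non_matching.items (fun it => it.2)).map (fun kv => kv.1)
  let merged := matching.update non_matching.items
  let groups : PySem.Dict Int (List String) :=
    merged.items.foldl (fun g kv => g.modify kv.2 [] (fun l => l ++ [kv.1])) PySem.Dict.empty
  (PySem.List.slice primary none (some 5)).foldl
    (fun result seed =>
      (PySem.List.sorted (groups.getD (merged.getD seed 0) []) (fun x => x)).foldl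
        (fun r name => if name ∈ r then r else r ++ [name]) result)
    []

-- ===== PRECONDITION & SPEC =====
-- Pre_ excludes exactly the inputs where A raises IndexError: pros longer than distances or travelPreferences.
def Pre_requestMatching (pros : List String) (distances : List Int) (travelPreferences : List Int) : Prop :=
  pros.length ≤ distances.length ∧ pros.length ≤ travelPreferences.length
instance (pros : List String) (distances : List Int) (travelPreferences : List Int) : Decidable (Pre_requestMatching pros distances travelPreferences) := by unfold Pre_requestMatching; infer_instance

def pvWitness_requestMatching : List String × List Int × List Int :=
  (["ann", "bob", "cat"], [3, 7, 2], [5, 4, 2])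

def Spec_requestMatching (pros : List String) (distances : List Int) (travelPreferences : List Int) (out : List String) : Prop := out = requestMatching_alt pros distances travelPreferences
instance (pros : List String) (distances : List Int) (travelPreferences : List Int) (out : List String) : Decidable (Spec_requestMatching pros distances travelPreferences out) := by unfold Spec_requestMatching; infer_instance

-- ===== CLAIM (what is proved, stated in full; the proofs are below) =====
def Claim_equal_requestMatching : Prop := ∀ (pros : List String) (distances : List Int) (travelPreferences : List Int), Dom_requestMatching pros distances travelPreferences → Pre_requestMatching pros distances travelPreferences → Spec_requestMatching pros distances travelPreferences (requestMatching pros distances travelPreferences)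


-- ===== LEMMAS AND PROOFS =====

-- The partition loop of A (indexing via range) computes the same pair of dicts as B's zip loop.
lemma pv_zip3_eq (pros : List String) (ds ts : List Int)
    (h1 : pros.length ≤ ds.length) (h2 : pros.length ≤ ts.length) :
    (PySem.List.pyRange 0 (pros.length : Int) 1).map
      (fun ii => (PySem.List.pyGetD pros ii "", (PySem.List.pyGetD ds ii 0, PySem.List.pyGetD ts ii 0)))
      = List.zip pros (List.zip ds ts) := by
  apply List.ext_getElem
  · simp [PySem.List.length_pyRange_one]
    omega
  · intro i hi1 hi2
    simp only [List.getElem_map, PySem.List.getElem_pyRange_one, List.getElem_zip, zero_add]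
    have hlen : i < pros.length := by
      simpa [PySem.List.length_pyRange_one] using hi1
    simp [PySem.List.pyGetD_natCast, List.getD_eq_getElem?_getD,
      hlen, Nat.lt_of_lt_of_le hlen h1, Nat.lt_of_lt_of_le hlen h2]

lemma pv_part_eq (pros : List String) (ds ts : List Int)
    (h1 : pros.length ≤ ds.length) (h2 : pros.length ≤ ts.length)
    (st : PySem.Dict String Int × PySem.Dict String Int) :
    (PySem.List.pyRange 0 (pros.length : Int) 1).foldl
      (fun (st : PySem.Dict String Int × PySem.Dict String Int) ii =>
        if PySem.List.pyGetD ds ii 0 ≤ PySem.List.pyGetD ts ii 0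
        then (st.1.insert (PySem.List.pyGetD pros ii "") (PySem.List.pyGetD ds ii 0), st.2)
        else (st.1, st.2.insert (PySem.List.pyGetD pros ii "") (PySem.List.pyGetD ds ii 0 - PySem.List.pyGetD ts ii 0))) st
    = (List.zip pros (List.zip ds ts)).foldl
      (fun st x => if x.2.1 ≤ x.2.2 then (st.1.insert x.1 x.2.1, st.2)
                   else (st.1, st.2.insert x.1 (x.2.1 - x.2.2))) st := by
  rw [← pv_zip3_eq pros ds ts h1 h2, List.foldl_map]

-- Both components of the partition fold keep Nodup key lists.
lemma pv_part_nodup (l : List (String × (Int × Int))) (st : PySem.Dict String Int × PySem.Dict String Int)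
    (hst1 : st.1.keys.Nodup) (hst2 : st.2.keys.Nodup) :
    (l.foldl (fun st x => if x.2.1 ≤ x.2.2 then (st.1.insert x.1 x.2.1, st.2)
                          else (st.1, st.2.insert x.1 (x.2.1 - x.2.2))) st).1.keys.Nodup ∧
    (l.foldl (fun st x => if x.2.1 ≤ x.2.2 then (st.1.insert x.1 x.2.1, st.2)
                          else (st.1, st.2.insert x.1 (x.2.1 - x.2.2))) st).2.keys.Nodup := by
  induction l generalizing st with
  | nil => exact ⟨hst1, hst2⟩
  | cons x rest ih =>
    simp only [List.foldl_cons]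
    by_cases h : x.2.1 ≤ x.2.2
    · simp only [if_pos h]
      exact ih _ (PySem.Dict.nodup_keys_insert _ _ _ hst1) hst2
    · simp only [if_neg h]
      exact ih _ hst1 (PySem.Dict.nodup_keys_insert _ _ _ hst2)

-- The value -> names index built by B's grouping pass, looked up at c, is the filtered key list.
lemma pv_groups_getD (items : List (String × Int)) (c : Int) :
    ((items.foldl (fun (g : PySem.Dict Int (List String)) kv =>
        g.modify kv.2 [] (fun l => l ++ [kv.1])) PySem.Dict.empty).getD c [])
      = (items.filter (fun kv => kv.2 == c)).map (fun kv => kv.1) := by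
  have hswap : items.foldl (fun (g : PySem.Dict Int (List String)) kv =>
        g.modify kv.2 [] (fun l => l ++ [kv.1])) PySem.Dict.empty
      = (items.map Prod.swap).foldl (fun (g : PySem.Dict Int (List String)) p =>
        g.modify p.1 [] (fun l => l ++ [p.2])) PySem.Dict.empty := by
    rw [List.foldl_map]
    rfl
  rw [hswap, PySem.Dict.getD_foldl_modify_append, PySem.Dict.getD_empty, List.filter_map, List.map_map]
  rfl

-- seed :: (same-value keys except seed) is a permutation of (all same-value keys), given unique keys.
lemma pv_perm_seed (l : List (String × Int)) (seed : String) (mv : Int)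
    (hnd : (l.map Prod.fst).Nodup) (hmem : (seed, mv) ∈ l) :
    (seed :: (l.filter (fun kv => kv.2 == mv && kv.1 != seed)).map (fun kv => kv.1)).Perm
      ((l.filter (fun kv => kv.2 == mv)).map (fun kv => kv.1)) := by
  induction l with
  | nil => simp at hmem
  | cons kv rest ih =>
    simp only [List.map_cons, List.nodup_cons] at hnd
    rcases List.mem_cons.mp hmem with heq | hrest
    · have hk : kv.1 = seed := by rw [← heq]
      have hw : kv.2 = mv := by rw [← heq]
      have hfilt : rest.filter (fun kv => kv.2 == mv && kv.1 != seed)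
          = rest.filter (fun kv => kv.2 == mv) := by
        apply List.filter_congr
        intro p hp
        have hne : p.1 ≠ seed := by
          intro h
          exact hnd.1 (hk ▸ h ▸ List.mem_map_of_mem hp)
        simp [hne]
      simp [hk, hw, hfilt]
    · have hne : kv.1 ≠ seed := by
        intro h
        exact hnd.1 (h ▸ (List.mem_map_of_mem hrest : (seed, mv).1 ∈ rest.map Prod.fst))
      have ihp := ih hnd.2 hrest
      have hb : (kv.1 != seed) = true := by simp [hne]
      by_cases hv : (kv.2 == mv) = true
      · simp only [List.filter_cons, hv, hb, Bool.and_self, if_pos, List.map_cons]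
        exact ((List.Perm.swap kv.1 seed _).trans (ihp.cons kv.1))
      · simp only [List.filter_cons, hv, hb, if_neg, Bool.false_eq_true,
          not_false_eq_true]
        exact ihp

-- fold over range(len(l[:5])) reading l[ii] is the fold over l[:5] itself (as a map over the range)
lemma pv_take5_map (l : List String) :
    (PySem.List.pyRange 0 (((PySem.List.slice l none (some 5)).length : Nat) : Int) 1).map
      (fun ii => PySem.List.pyGetD l ii "")
    = PySem.List.slice l none (some 5) := by
  have h5 : PySem.List.slice l none (some 5) = l.take 5 := by
    rw [PySem.List.slice_to l (by norm_num)]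
    congr 1
  rw [h5]
  apply List.ext_getElem
  · simp [PySem.List.length_pyRange_one]
    omega
  · intro i hi1 hi2
    simp only [List.getElem_map, PySem.List.getElem_pyRange_one, zero_add]
    have htl : i < (l.take 5).length := hi2
    have hl : i < l.length := lt_of_lt_of_le htl (by simpa using List.length_take_le 5 l)
    rw [PySem.List.pyGetD_eq_getElem l "" (by positivity) (by exact_mod_cast hl)]
    simp [List.getElem_take]

-- the A-side per-seed rescan, sorted, equals the sorted group list from B's index
lemma pv_inner_sorted (merged : PySem.Dict String Int) (hnd : merged.keys.Nodup)
    (seed : String) (hs : seed ∈ merged.keys) :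
    PySem.List.sorted
      (merged.items.foldl
        (fun m kv => if kv.2 == merged.getD seed 0 && kv.1 != seed then m ++ [kv.1] else m) [seed])
      (fun x => x)
    = PySem.List.sorted
      ((merged.items.foldl (fun (g : PySem.Dict Int (List String)) kv =>
          g.modify kv.2 [] (fun l => l ++ [kv.1])) PySem.Dict.empty).getD (merged.getD seed 0) [])
      (fun x => x) := by
  obtain ⟨v, hv⟩ : ∃ v, merged.get? seed = some v := by
    cases h : merged.get? seed with
    | none => exact absurd ((PySem.Dict.get?_eq_none_iff_not_mem_keys merged seed).mp h) (not_not.mpr hs)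
    | some v => exact ⟨v, rfl⟩
  have hgd : merged.getD seed 0 = v := PySem.Dict.getD_of_get?_eq_some merged 0 hv
  have hmem : (seed, v) ∈ merged.items := (PySem.Dict.get?_eq_some_iff_mem_items merged seed v hnd).mp hv
  have hndi : (merged.items.map Prod.fst).Nodup := hnd
  rw [PySem.List.foldl_append_if, pv_groups_getD]
  apply PySem.List.sorted_eq_sorted_of_perm _ _ _ (fun a b hab => hab)
  simpa using pv_perm_seed merged.items seed (merged.getD seed 0) hndi (hgd ▸ hmem)

lemma pv_main (pros : List String) (ds ts : List Int)
    (h1 : pros.length ≤ ds.length) (h2 : pros.length ≤ ts.length) :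
    requestMatching pros ds ts = requestMatching_alt pros ds ts := by
  unfold requestMatching requestMatching_alt
  simp only [pv_part_eq pros ds ts h1 h2, PySem.List.foldl_append_singleton_eq_map,
    List.nil_append]
  set D := List.foldl
      (fun (st : PySem.Dict String Int × PySem.Dict String Int) x =>
        if x.2.1 ≤ x.2.2 then (st.1.insert x.1 x.2.1, st.2)
        else (st.1, st.2.insert x.1 (x.2.1 - x.2.2)))
      (PySem.Dict.empty, PySem.Dict.empty) (pros.zip (ds.zip ts)) with hD
  set M := D.1.update D.2.items with hM
  set P := (PySem.List.sorted D.1.items (fun it => it.2)).map Prod.fst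
      ++ (PySem.List.sorted D.2.items (fun it => it.2)).map Prod.fst with hP
  have hnodup : M.keys.Nodup := by
    rw [hM]
    exact PySem.Dict.nodup_keys_update _ _
      (pv_part_nodup (pros.zip (ds.zip ts)) (PySem.Dict.empty, PySem.Dict.empty)
        (by simpa using PySem.Dict.nodup_keys_empty (κ := String) (ν := Int))
        (by simpa using PySem.Dict.nodup_keys_empty (κ := String) (ν := Int))).1
  have hkeys : ∀ s ∈ P, s ∈ M.keys := by
    intro s hsP
    have hku : M.keys = PySem.Set.update D.1.keys (D.2.items.map (fun p => p.1)) :=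
      PySem.Dict.keys_foldl_insert_key D.2.items (fun p => p.1) (fun d p => p.2) D.1
    rw [hku, PySem.Set.mem_update]
    rcases List.mem_append.mp hsP with h | h
    · obtain ⟨kv, hkv, rfl⟩ := List.mem_map.mp h
      exact Or.inl (List.mem_map_of_mem ((PySem.List.mem_sorted _ _ _ _).mp hkv))
    · obtain ⟨kv, hkv, rfl⟩ := List.mem_map.mp h
      exact Or.inr (List.mem_map_of_mem ((PySem.List.mem_sorted _ _ _ _).mp hkv))
  conv_rhs => rw [← pv_take5_map P, List.foldl_map]
  apply PySem.List.foldl_congr_mem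
  intro acc ii hii
  beta_reduce
  have hbnd := PySem.List.mem_pyRange_one.mp hii
  have hlt : ii < ((PySem.List.slice P none (some 5)).length : Int) := hbnd.2
  have hltP : ii < (P.length : Int) := by
    have : (PySem.List.slice P none (some 5)).length ≤ P.length := by
      rw [PySem.List.slice_to P (by norm_num)]
      simpa using List.length_take_le _ _
    exact lt_of_lt_of_le hlt (by exact_mod_cast this)
  have hseedP : PySem.List.pyGetD P ii "" ∈ P := by
    rw [PySem.List.pyGetD_eq_getElem P "" hbnd.1 hltP]
    exact List.getElem_mem _
  rw [pv_inner_sorted M hnodup (PySem.List.pyGetD P ii "") (hkeys _ hseedP)]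

-- ===== VERDICT (by name: the statement is the Claim_ definition above) =====
theorem requestMatching_spec : Claim_equal_requestMatching := by
  intro pros ds ts _ hpre
  exact pv_main pros ds ts hpre.1 hpre.2
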